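-- pv_equiv track=rewrite | github.com/Angelina-Hart/Scripting-Fundamentals | Module 6/space_explorer.py | calculate_path_to_goal
-- ===== SOURCE A (Python) =====
-- def calculate_path_to_goal(sorted_object_list):
--     objects_of_interest = []
--     for item in sorted_object_list:
--         if item[2] != ['G']:
--             if item[2] == ['F'] or item[2] == ['T']:
--                 objects_of_interest.append(item)
--             else:
--                 continue
--         else:
--             objects_of_interest.append(item)
--             break
--     return objects_of_interest
--     pass
-- ===== SOURCE B (Python) =====
-- def calculate_path_to_goal(sorted_object_list):
--     # Project out the tags, locate the first goal marker by index search,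
--     # truncate the list through that marker, and keep F/T/G items uniformly.
--     tags = [tuple(item[2]) for item in sorted_object_list]
--     try:
--         cut = tags.index(('G',)) + 1
--     except ValueError:
--         cut = len(tags)
--     return [item for item in sorted_object_list[:cut]
--             if tuple(item[2]) in {('F',), ('T',), ('G',)}]
-- ===== Notes on version B (the rewrite author's own statement) =====
-- stated objective: alternative
-- what changed: Replaces the fused loop-with-break and conditional accumulator by a staged pipeline: project each item's tag, locate the terminating 'G' by a positional index search, slice the list through it, and apply one uniform three-way membership filter (no break, no conditional append).
import Mathlib
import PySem

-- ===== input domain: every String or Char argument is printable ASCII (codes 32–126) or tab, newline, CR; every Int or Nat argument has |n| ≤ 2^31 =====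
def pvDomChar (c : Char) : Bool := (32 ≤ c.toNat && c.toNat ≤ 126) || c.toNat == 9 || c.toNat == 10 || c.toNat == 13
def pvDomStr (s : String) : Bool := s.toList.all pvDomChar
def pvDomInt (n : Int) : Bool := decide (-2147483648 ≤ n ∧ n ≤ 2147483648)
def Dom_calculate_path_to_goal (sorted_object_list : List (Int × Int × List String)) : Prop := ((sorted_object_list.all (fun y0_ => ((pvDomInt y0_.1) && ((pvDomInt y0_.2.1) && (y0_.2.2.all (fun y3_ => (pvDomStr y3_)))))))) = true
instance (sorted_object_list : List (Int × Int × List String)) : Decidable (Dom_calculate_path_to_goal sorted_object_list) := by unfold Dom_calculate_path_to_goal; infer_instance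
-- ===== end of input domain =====

-- B replaces A's fused loop-with-break by a staged pipeline: tag projection, index search for the first 'G', slice-through, one uniform filter (alternative decomposition, same cost).


-- ===== PORT A =====
-- loop with accumulator and break, transcribed as structural recursion over the remaining items
def calcA_loop (items : List (Int × Int × List String)) (acc : List (Int × Int × List String)) : List (Int × Int × List String) :=
  match items with
  | [] => acc
  | item :: rest =>
    if item.2.2 ≠ ["G"] then
      if item.2.2 = ["F"] ∨ item.2.2 = ["T"] then calcA_loop rest (acc ++ [item])
      else calcA_loop rest acc
    else acc ++ [item]

def calculate_path_to_goal (sorted_object_list : List (Int × Int × List String)) : List (Int × Int × List String) :=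
  calcA_loop sorted_object_list []

-- ===== PORT B =====
-- Source B: project tags, index-search the first 'G' (ValueError → whole length), slice through it, uniform membership filter
def calculate_path_to_goal_alt (sorted_object_list : List (Int × Int × List String)) : List (Int × Int × List String) :=
  let tags := sorted_object_list.map (fun item => item.2.2)
  let cut : Nat :=
    match PySem.List.index? tags ["G"] with
    | some i => i + 1
    | none => tags.length
  (sorted_object_list.take cut).filter     -- l[:cut] with cut ≥ 0 is take
    (fun item => item.2.2 = ["F"] ∨ item.2.2 = ["T"] ∨ item.2.2 = ["G"])

-- ===== PRECONDITION & SPEC =====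
def Spec_calculate_path_to_goal (sorted_object_list : List (Int × Int × List String)) (out : List (Int × Int × List String)) : Prop := out = calculate_path_to_goal_alt sorted_object_list
instance (sorted_object_list : List (Int × Int × List String)) (out : List (Int × Int × List String)) : Decidable (Spec_calculate_path_to_goal sorted_object_list out) := by unfold Spec_calculate_path_to_goal; infer_instance

-- ===== CLAIM (what is proved, stated in full; the proofs are below) =====
def Claim_equal_calculate_path_to_goal : Prop := ∀ (sorted_object_list : List (Int × Int × List String)), Dom_calculate_path_to_goal sorted_object_list → Spec_calculate_path_to_goal sorted_object_list (calculate_path_to_goal sorted_object_list)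

-- ===== LEMMAS AND PROOFS =====
theorem calcA_loop_acc (items : List (Int × Int × List String)) (acc : List (Int × Int × List String)) :
    calcA_loop items acc = acc ++ calcA_loop items [] := by
  induction items generalizing acc with
  | nil => simp [calcA_loop]
  | cons item rest ih =>
    by_cases hG : item.2.2 = ["G"]
    · simp [calcA_loop, hG]
    · by_cases hFT : item.2.2 = ["F"] ∨ item.2.2 = ["T"]
      · simp only [calcA_loop, if_pos hFT, ne_eq, hG, not_false_iff, if_true]
        rw [ih (acc ++ [item]), ih ([] ++ [item])]
        simp
      · simp only [calcA_loop, ne_eq, hG, not_false_iff, if_true, if_neg hFT]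
        exact ih acc

theorem calc_eq (l : List (Int × Int × List String)) :
    calculate_path_to_goal l = calculate_path_to_goal_alt l := by
  induction l with
  | nil => simp [calculate_path_to_goal, calculate_path_to_goal_alt, calcA_loop]
  | cons item rest ih =>
    simp only [calculate_path_to_goal, calculate_path_to_goal_alt] at *
    by_cases hG : item.2.2 = ["G"]
    · rw [show (item :: rest).map (fun item => item.2.2) = item.2.2 :: rest.map (fun i => i.2.2) from rfl,
        hG, PySem.List.index?_cons_self]
      simp [calcA_loop, hG]
    · have hidx : PySem.List.index? ((item :: rest).map (fun i => i.2.2)) ["G"]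
          = (PySem.List.index? (rest.map (fun i => i.2.2)) ["G"]).map (· + 1) := by
        exact PySem.List.index?_cons_of_ne (xs := rest.map (fun i => i.2.2)) hG
      by_cases hFT : item.2.2 = ["F"] ∨ item.2.2 = ["T"]
      · simp only [calcA_loop, ne_eq, hG, not_false_iff, if_true, if_pos hFT]
        rw [calcA_loop_acc, ih]
        rw [List.map_cons] at hidx ⊢
        rw [hidx]
        cases h : PySem.List.index? (rest.map (fun i => i.2.2)) ["G"] with
        | some i => simp [List.take_succ_cons, hFT.elim (fun h => Or.inl h) (fun h => Or.inr (Or.inl h))]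
        | none => simp [List.take_succ_cons, hFT.elim (fun h => Or.inl h) (fun h => Or.inr (Or.inl h))]
      · simp only [calcA_loop, ne_eq, hG, not_false_iff, if_true, if_neg hFT]
        rw [ih]
        have hno : ¬ (item.2.2 = ["F"] ∨ item.2.2 = ["T"] ∨ item.2.2 = ["G"]) := by
          rintro (h | h | h)
          · exact hFT (Or.inl h)
          · exact hFT (Or.inr h)
          · exact hG h
        rw [List.map_cons] at hidx ⊢
        rw [hidx]
        cases h : PySem.List.index? (rest.map (fun i => i.2.2)) ["G"] with
        | some i => simp [List.take_succ_cons, hno]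
        | none => simp [List.take_succ_cons, hno]

-- ===== VERDICT (by name: the statement is the Claim_ definition above) =====
theorem calculate_path_to_goal_spec : Claim_equal_calculate_path_to_goal := by
  intro l _
  unfold Spec_calculate_path_to_goal
  exact calc_eq l
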